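-- pv_equiv track=rewrite | github.com/MrBrantCode/unitest_baseline | mut_generate/mist_train_cf/cf_71226/solution.py | G
-- ===== SOURCE A (Python) =====
-- def G(n):
--     """
--     Calculate the value of G(n) for given n.
--
--     G(n) is the sum of g(s+p+q,s,p,q) for s+p+q ≤ n, p < q, p ≥ 5, s ≥ 5,
--     and all s, p, q are integers.
--
--     Args:
--     n (int): The upper limit for the sum.
--
--     Returns:
--     int: The value of G(n).
--     """
--     count = 0
--     for s in range(5, n+1):
--         for p in range(5, s+1):
--             for q in range(p+1, n-s-p+1):
--                 if s*s + 2*s*(p + q) <= (s + p + q)*(s + p + q):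
--                     count += 1
--     return count
-- ===== SOURCE B (Python) =====
-- def G(n):
--     # The if-condition in A is identically true, so the inner q-loop just
--     # counts its range: max(0, n - s - 2*p) values. Drop that loop.
--     count = 0
--     for s in range(5, n + 1):
--         for p in range(5, s + 1):
--             count += max(0, n - s - 2 * p)
--     return count
-- ===== Notes on version B (the rewrite author's own statement) =====
-- stated objective: faster
-- what changed: The guard s*s+2*s*(p+q) <= (s+p+q)^2 is identically true (it reduces to 0 <= (p+q)^2), so the innermost q-loop is replaced by the closed-form count max(0, n-s-2p) of its range, removing one loop level.
import Mathlib
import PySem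

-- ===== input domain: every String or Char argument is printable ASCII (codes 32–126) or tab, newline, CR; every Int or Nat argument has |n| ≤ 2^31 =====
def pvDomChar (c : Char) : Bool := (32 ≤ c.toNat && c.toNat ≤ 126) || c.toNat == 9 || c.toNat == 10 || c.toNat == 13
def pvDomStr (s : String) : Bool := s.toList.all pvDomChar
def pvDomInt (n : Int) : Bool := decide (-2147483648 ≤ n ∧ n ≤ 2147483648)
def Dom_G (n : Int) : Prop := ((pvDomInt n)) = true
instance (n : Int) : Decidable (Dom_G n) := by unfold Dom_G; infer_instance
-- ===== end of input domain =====

-- B removes A's innermost loop: A's guard is identically true, so that loop counts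
-- its range, max(0, n-s-2p); objective: faster (asymptotic, O(n^2) vs O(n^3)).


-- ===== PORT A =====
def G (n : Int) : Int :=
  (PySem.List.pyRange 5 (n + 1) 1).foldl (fun count s =>
    (PySem.List.pyRange 5 (s + 1) 1).foldl (fun count p =>
      (PySem.List.pyRange (p + 1) (n - s - p + 1) 1).foldl (fun count q =>
        if s * s + 2 * s * (p + q) ≤ (s + p + q) * (s + p + q) then count + 1 else count)
        count)
      count)
    0

-- ===== PORT B =====
def G_alt (n : Int) : Int :=
  (PySem.List.pyRange 5 (n + 1) 1).foldl (fun count s =>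
    (PySem.List.pyRange 5 (s + 1) 1).foldl (fun count p =>
      count + max 0 (n - s - 2 * p))
      count)
    0

-- ===== PRECONDITION & SPEC =====
def Spec_G (n : Int) (out : Int) : Prop := out = G_alt n
instance (n : Int) (out : Int) : Decidable (Spec_G n out) := by unfold Spec_G; infer_instance

-- ===== CLAIM (what is proved, stated in full; the proofs are below) =====
def Claim_equal_G : Prop := ∀ (n : Int), Dom_G n → Spec_G n (G n)

-- ===== LEMMAS AND PROOFS =====

-- a fold that conditionally counts, whose condition holds on every element, adds the length
theorem foldl_count_true {α : Type} (P : α → Prop) [DecidablePred P] :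
    ∀ (l : List α) (c : Int), (∀ x ∈ l, P x) →
      l.foldl (fun c x => if P x then c + 1 else c) c = c + l.length := by
  intro l
  induction l with
  | nil => intro c _; simp
  | cons a t ih =>
    intro c h
    simp only [List.foldl_cons, if_pos (h a (List.mem_cons_self))]
    rw [ih (c + 1) (fun x hx => h x (List.mem_cons_of_mem a hx))]
    simp [Int.add_assoc]
    omega

-- A's inner q-loop equals B's closed-form increment
theorem inner_loop_eq (n s p c : Int) :
    (PySem.List.pyRange (p + 1) (n - s - p + 1) 1).foldl (fun count q =>
        if s * s + 2 * s * (p + q) ≤ (s + p + q) * (s + p + q) then count + 1 else count)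
        c = c + max 0 (n - s - 2 * p) := by
  rw [foldl_count_true (fun q => s * s + 2 * s * (p + q) ≤ (s + p + q) * (s + p + q))]
  · rw [PySem.List.length_pyRange_one]
    omega
  · intro q _
    nlinarith [sq_nonneg (p + q)]

-- ===== VERDICT (by name: the statement is the Claim_ definition above) =====
theorem G_spec : Claim_equal_G := by
  intro n _
  unfold Spec_G G G_alt
  apply PySem.List.foldl_congr_mem
  intro c s _
  apply PySem.List.foldl_congr_mem
  intro c p _
  exact inner_loop_eq n s p c
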